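-- pv_equiv track=rewrite | github.com/spillz/minepy2 | mapgen.py | _trim_path_to_bounds
-- ===== SOURCE A (Python) =====
-- def _trim_path_to_bounds(path, bounds, margin):
--     xmin, xmax, zmin, zmax = bounds
--     xmin -= margin
--     xmax += margin
--     zmin -= margin
--     zmax += margin
--     keep = [idx for idx, (x, z) in enumerate(path)
--             if xmin <= x <= xmax and zmin <= z <= zmax]
--     if not keep:
--         return None
--     start = max(0, keep[0] - 1)
--     end = min(len(path), keep[-1] + 2)
--     return path[start:end]
-- ===== SOURCE B (Python) =====
-- def _trim_path_to_bounds(path, bounds, margin):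
--     xmin, xmax, zmin, zmax = bounds
--
--     def outside(pt):
--         x, z = pt
--         return not (xmin - margin <= x <= xmax + margin
--                     and zmin - margin <= z <= zmax + margin)
--
--     lead = 0
--     while lead < len(path) and outside(path[lead]):
--         lead += 1
--     if lead == len(path):
--         return None
--     trail = 0
--     while outside(path[len(path) - 1 - trail]):
--         trail += 1
--     drop_front = lead - 1 if lead > 0 else 0
--     drop_back = trail - 1 if trail > 0 else 0
--     return path[drop_front:len(path) - drop_back]
-- ===== Notes on version B (the rewrite author's own statement) =====
-- stated objective: alternative
-- what changed: Replaces the full in-bounds index list and its min/max slice arithmetic with two while-loops that count the out-of-bounds prefix and suffix and then drop those counts (minus the one-point margin) from each end.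
import Mathlib
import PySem

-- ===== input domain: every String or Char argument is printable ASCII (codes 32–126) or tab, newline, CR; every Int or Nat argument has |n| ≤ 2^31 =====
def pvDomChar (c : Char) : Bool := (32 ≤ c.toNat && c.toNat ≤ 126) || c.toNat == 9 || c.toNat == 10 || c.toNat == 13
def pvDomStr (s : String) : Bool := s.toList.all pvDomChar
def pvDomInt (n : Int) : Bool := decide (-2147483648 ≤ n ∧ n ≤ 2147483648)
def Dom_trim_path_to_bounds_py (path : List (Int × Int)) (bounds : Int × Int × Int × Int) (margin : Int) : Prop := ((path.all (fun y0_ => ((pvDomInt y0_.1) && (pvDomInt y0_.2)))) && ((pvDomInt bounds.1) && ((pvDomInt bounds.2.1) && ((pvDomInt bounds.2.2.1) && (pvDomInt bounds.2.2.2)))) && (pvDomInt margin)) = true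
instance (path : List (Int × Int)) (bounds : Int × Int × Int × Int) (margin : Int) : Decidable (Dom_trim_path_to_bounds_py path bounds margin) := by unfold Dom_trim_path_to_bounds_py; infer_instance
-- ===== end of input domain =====

-- B counts the out-of-bounds prefix and suffix with two early-exit while-loops and
-- drops those counts (minus the one-point margin) from each end; same return values.

-- ===== PORT A =====
-- A's comprehension: the list of indices (as Python ints) whose point is in bounds
def tp_keep (pred : Int × Int → Bool) (i : Int) : List (Int × Int) → List Int
  | [] => []
  | p :: rest => if pred p then i :: tp_keep pred (i + 1) rest else tp_keep pred (i + 1) rest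

def trim_path_to_bounds_py (path : List (Int × Int)) (bounds : Int × Int × Int × Int) (margin : Int) : Option (List (Int × Int)) :=
  let xmin := bounds.1 - margin
  let xmax := bounds.2.1 + margin
  let zmin := bounds.2.2.1 - margin
  let zmax := bounds.2.2.2 + margin
  let pred : Int × Int → Bool := fun p => decide (xmin ≤ p.1) && decide (p.1 ≤ xmax) && decide (zmin ≤ p.2) && decide (p.2 ≤ zmax)
  match tp_keep pred 0 path with
  | [] => none
  | k0 :: ks =>
    let start := max 0 (k0 - 1)
    let stop := min ((path.length : Int)) ((k0 :: ks).getLastD 0 + 2)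
    some (PySem.List.slice path (some start) (some stop))

-- ===== PORT B =====
-- Source B's while loop: number of consecutive points satisfying `outside` at the front
def tp_out_prefix (outside : Int × Int → Bool) : List (Int × Int) → Nat
  | [] => 0
  | p :: rest => if outside p then tp_out_prefix outside rest + 1 else 0

def trim_path_to_bounds_py_alt (path : List (Int × Int)) (bounds : Int × Int × Int × Int) (margin : Int) : Option (List (Int × Int)) :=
  let xmin := bounds.1 - margin
  let xmax := bounds.2.1 + margin
  let zmin := bounds.2.2.1 - margin
  let zmax := bounds.2.2.2 + margin
  let outside : Int × Int → Bool := fun p => !(decide (xmin ≤ p.1) && decide (p.1 ≤ xmax) && decide (zmin ≤ p.2) && decide (p.2 ≤ zmax))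
  let lead := tp_out_prefix outside path
  if lead = path.length then none
  else
    let trail := tp_out_prefix outside path.reverse   -- the backward while loop scans from the end
    let dropFront := if 0 < lead then lead - 1 else 0
    let dropBack := if 0 < trail then trail - 1 else 0
    -- path[dropFront : len - dropBack] with 0 ≤ dropFront, dropBack ≤ len: exact as take-then-drop
    some ((path.take (path.length - dropBack)).drop dropFront)

-- ===== PRECONDITION & SPEC =====
def Spec_trim_path_to_bounds_py (path : List (Int × Int)) (bounds : Int × Int × Int × Int) (margin : Int) (out : Option (List (Int × Int))) : Prop := out = trim_path_to_bounds_py_alt path bounds margin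
instance (path : List (Int × Int)) (bounds : Int × Int × Int × Int) (margin : Int) (out : Option (List (Int × Int))) : Decidable (Spec_trim_path_to_bounds_py path bounds margin out) := by unfold Spec_trim_path_to_bounds_py; infer_instance

-- ===== CLAIM =====
def Claim_equal_trim_path_to_bounds_py : Prop := ∀ (path : List (Int × Int)) (bounds : Int × Int × Int × Int) (margin : Int), Dom_trim_path_to_bounds_py path bounds margin → Spec_trim_path_to_bounds_py path bounds margin (trim_path_to_bounds_py path bounds margin)

-- ===== LEMMAS AND PROOFS =====

-- ghost helper for the proof: index of the first element satisfying pred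
def tp_scan (pred : Int × Int → Bool) (i : Int) : List (Int × Int) → Option Int
  | [] => none
  | p :: rest => if pred p then some i else tp_scan pred (i + 1) rest

theorem tp_out_prefix_le (out : Int × Int → Bool) (l : List (Int × Int)) :
    tp_out_prefix out l ≤ l.length := by
  induction l with
  | nil => simp [tp_out_prefix]
  | cons p rest ih => simp only [tp_out_prefix, List.length_cons]; split_ifs <;> omega

-- the first-match scan in terms of the out-of-bounds prefix count
theorem tp_scan_eq_prefix (pred : Int × Int → Bool) (l : List (Int × Int)) (i : Int) :
    tp_scan pred i l =
      if tp_out_prefix (fun p => !pred p) l = l.length then none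
      else some (i + (tp_out_prefix (fun p => !pred p) l : Int)) := by
  induction l generalizing i with
  | nil => rfl
  | cons p rest ih =>
    have hout : tp_out_prefix (fun q => !pred q) (p :: rest)
        = if pred p then 0 else tp_out_prefix (fun q => !pred q) rest + 1 := by
      by_cases h : pred p = true <;> simp [tp_out_prefix, h]
    by_cases h : pred p = true
    · simp [tp_scan, h, hout]
    · rw [show tp_scan pred i (p :: rest) = tp_scan pred (i + 1) rest from by simp [tp_scan, h],
        ih, hout, if_neg h]
      simp only [List.length_cons]
      split_ifs with h1 h2 h3
      · rfl
      · omega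
      · omega
      · congr 1; push_cast; ring

-- head of A's index list = the forward scan
theorem tp_keep_head (pred : Int × Int → Bool) (l : List (Int × Int)) (i : Int) :
    (tp_keep pred i l).head? = tp_scan pred i l := by
  induction l generalizing i with
  | nil => rfl
  | cons p rest ih =>
    simp only [tp_keep, tp_scan]
    by_cases h : pred p = true <;> simp [h, ih]

theorem tp_scan_append (pred : Int × Int → Bool) (a b : List (Int × Int)) (i : Int) :
    tp_scan pred i (a ++ b) =
      match tp_scan pred i a with
      | some j => some j
      | none => tp_scan pred (i + a.length) b := by
  induction a generalizing i with
  | nil => simp [tp_scan]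
  | cons p rest ih =>
    simp only [List.cons_append, tp_scan]
    by_cases h : pred p = true
    · simp [h]
    · simp only [h, ih]
      have : i + 1 + (rest.length : Int) = i + (rest.length + 1 : Nat) := by push_cast; ring
      simp [this]

theorem getLast?_cons_of_some {A : Type} (a v : A) (t : List A) (h : t.getLast? = some v) : (a :: t).getLast? = some v := by
  cases t with
  | nil => simp at h
  | cons b bs => rw [List.getLast?_cons_cons]; exact h

-- last of A's index list = the index the backward scan computes
theorem tp_keep_getLast? (pred : Int × Int → Bool) (l : List (Int × Int)) (i : Int) :
    (tp_keep pred i l).getLast? =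
      (tp_scan pred 0 l.reverse).map (fun j => i + (l.length : Int) - 1 - j) := by
  induction l generalizing i with
  | nil => rfl
  | cons p rest ih =>
    have hrev : (p :: rest).reverse = rest.reverse ++ [p] := by simp
    rw [hrev, tp_scan_append]
    by_cases h : pred p = true
    · simp only [tp_keep, h, if_true]
      rcases hs : tp_scan pred 0 rest.reverse with _ | j
      · have htail : (tp_keep pred (i + 1) rest).getLast? = none := by
          rw [ih]; simp [hs]
        have hnil : tp_keep pred (i + 1) rest = [] := by
          cases htk : tp_keep pred (i + 1) rest with
          | nil => rfl
          | cons a as => rw [htk] at htail; simp at htail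
        simp only [hnil, List.getLast?_singleton]
        simp only [tp_scan, h, if_true, List.length_reverse, Option.map_some, List.length_cons]
        congr 1
        push_cast; ring
      · have htail : (tp_keep pred (i + 1) rest).getLast? = some (i + 1 + (rest.length : Int) - 1 - j) := by
          rw [ih]; simp [hs]
        rw [getLast?_cons_of_some _ _ _ htail]
        simp only [Option.map_some, List.length_cons]
        congr 1
        push_cast; ring
    · rw [show tp_keep pred i (p :: rest) = tp_keep pred (i + 1) rest from by simp [tp_keep, h]]
      rw [ih]
      rcases hs : tp_scan pred 0 rest.reverse with _ | j
      · simp [tp_scan, h]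
      · simp only [Option.map_some, List.length_cons]
        congr 1
        push_cast; ring

theorem getLast?_eq_getLastD {A : Type} (k0 : A) (ks : List A) (d : A) :
    (k0 :: ks).getLast? = some ((k0 :: ks).getLastD d) := by
  induction ks generalizing k0 with
  | nil => rfl
  | cons a as ih => rw [List.getLast?_cons_cons, ih a]; simp

-- the whole function, for an arbitrary bounds predicate
theorem tp_main (pred : Int × Int → Bool) (path : List (Int × Int)) :
    (match tp_keep pred 0 path with
     | [] => none
     | k0 :: ks => some (PySem.List.slice path (some (max 0 (k0 - 1))) (some (min ((path.length : Int)) ((k0 :: ks).getLastD 0 + 2)))))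
    = (let lead := tp_out_prefix (fun p => !pred p) path
       if lead = path.length then none
       else
         let trail := tp_out_prefix (fun p => !pred p) path.reverse
         let dropFront := if 0 < lead then lead - 1 else 0
         let dropBack := if 0 < trail then trail - 1 else 0
         some ((path.take (path.length - dropBack)).drop dropFront)) := by
  have hhead := tp_keep_head pred path 0
  have hlast := tp_keep_getLast? pred path 0
  rw [tp_scan_eq_prefix] at hhead
  set lead := tp_out_prefix (fun p => !pred p) path with hlead
  set trail := tp_out_prefix (fun p => !pred p) path.reverse with htrail
  have hleadle := tp_out_prefix_le (fun p => !pred p) path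
  have htraille : trail ≤ path.length := by
    have := tp_out_prefix_le (fun p => !pred p) path.reverse
    simpa using this
  cases hk : tp_keep pred 0 path with
  | nil =>
    rw [hk] at hhead
    simp only [List.head?_nil] at hhead
    by_cases hc : lead = path.length
    · simp [hc]
    · rw [if_neg hc] at hhead; simp at hhead
  | cons k0 ks =>
    rw [hk] at hhead hlast
    simp only [List.head?_cons] at hhead
    by_cases hc : lead = path.length
    · rw [if_pos hc] at hhead; simp at hhead
    rw [if_neg hc] at hhead
    have hk0 : k0 = (lead : Int) := by
      have := hhead.symm
      simp only [Option.some.injEq] at this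
      omega
    rw [getLast?_eq_getLastD k0 ks 0, tp_scan_eq_prefix] at hlast
    by_cases hct : trail = path.reverse.length
    · rw [if_pos (by simpa using hct)] at hlast; simp at hlast
    rw [if_neg (by simpa using hct)] at hlast
    simp only [Option.map_some, Option.some.injEq] at hlast
    have htlt : trail < path.length := by
      simp only [List.length_reverse] at hct; omega
    simp only [hc, if_false]
    congr 1
    rw [← htrail] at hlast
    have hlast' : (k0 :: ks).getLastD 0 = (path.length : Int) - 1 - (trail : Int) := by
      rw [hlast]; ring
    have ha : max 0 ((lead : Int) - 1) = ((if 0 < lead then lead - 1 else 0 : Nat) : Int) := by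
      split_ifs with h <;> omega
    have hb : min ((path.length : Int)) (((path.length : Int) - 1 - (trail : Int)) + 2)
        = ((path.length - (if 0 < trail then trail - 1 else 0) : Nat) : Int) := by
      split_ifs with h <;> omega
    rw [hlast', hk0, ha, hb, PySem.List.slice_natCast, List.drop_take]

-- ===== VERDICT =====
theorem trim_path_to_bounds_py_spec : Claim_equal_trim_path_to_bounds_py := by
  intro path bounds margin _
  unfold Spec_trim_path_to_bounds_py trim_path_to_bounds_py trim_path_to_bounds_py_alt
  exact tp_main _ path
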